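-- pv_equiv track=rewrite | github.com/KyleJGreen/Gematria | GematriaFunctions.py | getDigitSum
-- ===== SOURCE A (Python) =====
-- def getDigitSum(word, sums):
--     # base case
--     if word <= 9:
--         return sums
--     else:
--         sum = 0
--         for digit in str(word):
--             sum += int(digit)
--         sums.append(sum)
--         return (getDigitSum((sum), sums))
-- ===== SOURCE B (Python) =====
-- def getDigitSum(word, sums):
--     # Iterative reformulation: arithmetic digit extraction (divmod) instead of
--     # string conversion, explicit while loop instead of tail recursion.
--     # Mutates `sums` in place and returns the same list object, like A.
--     while word > 9:
--         s = 0
--         n = word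
--         while n > 0:
--             s += n % 10
--             n //= 10
--         sums.append(s)
--         word = s
--     return sums
-- ===== Notes on version B (the rewrite author's own statement) =====
-- stated objective: alternative
-- what changed: Replaces the tail recursion over str(word) with an explicit while loop that extracts digits arithmetically via % 10 and // 10, never converting the number to a string.
import Mathlib
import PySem

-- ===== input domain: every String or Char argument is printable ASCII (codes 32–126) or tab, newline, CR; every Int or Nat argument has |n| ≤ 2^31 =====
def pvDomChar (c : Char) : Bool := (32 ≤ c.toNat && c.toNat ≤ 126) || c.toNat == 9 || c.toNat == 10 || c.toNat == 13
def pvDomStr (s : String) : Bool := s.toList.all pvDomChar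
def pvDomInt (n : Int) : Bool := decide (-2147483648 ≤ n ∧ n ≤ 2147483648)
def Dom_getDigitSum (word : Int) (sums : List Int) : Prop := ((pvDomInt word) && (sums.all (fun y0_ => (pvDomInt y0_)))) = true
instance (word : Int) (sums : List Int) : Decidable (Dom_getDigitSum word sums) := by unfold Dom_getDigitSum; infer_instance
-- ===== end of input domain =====

-- B replaces A's string-based tail recursion by an explicit while loop extracting
-- digits arithmetically (% 10, // 10); equivalence is about the RETURN value
-- (Python B performs the same in-place appends to `sums` as A).

-- ===== PORT A =====
-- int(digit): `digit` is always one decimal digit character here, so the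
-- `.getD 0` default for the ValueError case is never exercised.
def pvIntOfDigitChar (c : Char) : Int := (PySem.Int.ofStr? (String.ofList [c])).getD 0

-- 'sum = 0; for digit in str(word): sum += int(digit)'
def pvStrDigitSum (word : Int) : Int :=
  (PySem.Int.toStr word).toList.foldl (fun s c => s + pvIntOfDigitChar c) 0

-- fuel-guarded transcription of A's recursion; the fuel word.toNat + 1 is a
-- totality guard only (each step strictly shrinks a positive word in reality)
def getDigitSumGo : Nat → Int → List Int → List Int
  | 0, _, sums => sums
  | f + 1, word, sums =>
    if word ≤ 9 then sums
    else
      let sum := pvStrDigitSum word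
      getDigitSumGo f sum (sums ++ [sum])

def getDigitSum (word : Int) (sums : List Int) : List Int :=
  getDigitSumGo (word.toNat + 1) word sums

-- ===== PORT B =====
-- inner loop 'while n > 0: s += n % 10; n //= 10' (terminates: n //= 10 shrinks n)
def pvDigitLoop (n s : Int) : Int :=
  if _h : 0 < n then pvDigitLoop (PySem.Int.floordiv n 10) (s + PySem.Int.mod n 10) else s
termination_by n.toNat
decreasing_by
  simp only [PySem.Int.floordiv, Int.fdiv_eq_ediv]
  norm_num
  omega

-- outer loop 'while word > 9: … sums.append(s); word = s', fuel-guarded as in A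
def getDigitSumAltGo : Nat → Int → List Int → List Int
  | 0, _, sums => sums
  | f + 1, word, sums =>
    if 9 < word then
      let s := pvDigitLoop word 0
      getDigitSumAltGo f s (sums ++ [s])
    else sums

def getDigitSum_alt (word : Int) (sums : List Int) : List Int :=
  getDigitSumAltGo (word.toNat + 1) word sums

-- ===== PRECONDITION & SPEC =====
def Spec_getDigitSum (word : Int) (sums : List Int) (out : List Int) : Prop := out = getDigitSum_alt word sums
instance (word : Int) (sums : List Int) (out : List Int) : Decidable (Spec_getDigitSum word sums out) := by unfold Spec_getDigitSum; infer_instance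

-- ===== CLAIM (what is proved, stated in full; the proofs are below) =====
def Claim_equal_getDigitSum : Prop := ∀ (word : Int) (sums : List Int), Dom_getDigitSum word sums → Spec_getDigitSum word sums (getDigitSum word sums)

-- ===== LEMMAS AND PROOFS =====

-- reference digit sum of a natural number
def pvDSum (n : Nat) : Nat :=
  if n = 0 then 0 else n % 10 + pvDSum (n / 10)
decreasing_by omega

theorem pvDSum_eq (n : Nat) : pvDSum n = n % 10 + pvDSum (n / 10) := by
  rw [pvDSum]
  split_ifs with h
  · subst h; simp [pvDSum]
  · rfl

theorem pvIntOfDigitChar_digitChar (d : Nat) (hd : d < 10) :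
    pvIntOfDigitChar (Nat.digitChar d) = (d : Int) := by
  interval_cases d <;> decide

theorem sum_toDigitsCore :
    ∀ (f n : Nat) (acc : List Char), n < f →
      ((Nat.toDigitsCore 10 f n acc).map pvIntOfDigitChar).sum
        = (pvDSum n : Int) + ((acc.map pvIntOfDigitChar).sum) := by
  intro f
  induction f with
  | zero => intro n acc h; omega
  | succ f ih =>
    intro n acc h
    simp only [Nat.toDigitsCore]
    by_cases h0 : n / 10 = 0
    · simp only [h0, if_true, List.map_cons, List.sum_cons,
        pvIntOfDigitChar_digitChar (n % 10) (by omega)]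
      rw [pvDSum_eq n, h0]
      simp [pvDSum]
    · rw [if_neg h0, ih (n / 10) _ (by omega)]
      simp only [List.map_cons, List.sum_cons,
        pvIntOfDigitChar_digitChar (n % 10) (by omega)]
      rw [pvDSum_eq n]
      push_cast
      ring

theorem strSum_eq_dsum (w : Int) (hw : 9 < w) :
    pvStrDigitSum w = (pvDSum w.toNat : Int) := by
  unfold pvStrDigitSum
  rw [PySem.Int.toList_toStr]
  unfold PySem.Int.toChars
  rw [if_neg (by omega)]
  rw [PySem.List.foldl_add]
  unfold Nat.toDigits
  rw [sum_toDigitsCore (w.toNat + 1) w.toNat [] (by omega)]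
  simp

theorem digitLoop_eq (n s : Int) (hn : 0 ≤ n) :
    pvDigitLoop n s = s + (pvDSum n.toNat : Int) := by
  induction n, s using pvDigitLoop.induct with
  | case1 n s hpos ih =>
    rw [pvDigitLoop, dif_pos hpos, ih (by
      simp only [PySem.Int.floordiv, Int.fdiv_eq_ediv]
      norm_num
      omega)]
    have hdiv : (PySem.Int.floordiv n 10).toNat = n.toNat / 10 := by
      simp only [PySem.Int.floordiv, Int.fdiv_eq_ediv]
      norm_num
      omega
    have hmod : PySem.Int.mod n 10 = ((n.toNat % 10 : Nat) : Int) := by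
      simp only [PySem.Int.mod, Int.fmod_eq_emod]
      norm_num
      omega
    rw [hdiv, hmod, pvDSum_eq n.toNat]
    push_cast
    ring
  | case2 n s hpos =>
    rw [pvDigitLoop, dif_neg hpos]
    have : n = 0 := by omega
    subst this
    simp [pvDSum]

theorem step_eq (w : Int) (hw : 9 < w) : pvStrDigitSum w = pvDigitLoop w 0 := by
  rw [strSum_eq_dsum w hw, digitLoop_eq w 0 (by omega)]
  simp

theorem go_eq : ∀ (f : Nat) (word : Int) (sums : List Int),
    getDigitSumGo f word sums = getDigitSumAltGo f word sums := by
  intro f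
  induction f with
  | zero => intro word sums; rfl
  | succ f ih =>
    intro word sums
    simp only [getDigitSumGo, getDigitSumAltGo]
    by_cases h : word ≤ 9
    · rw [if_pos h, if_neg (by omega)]
    · rw [if_neg h, if_pos (by omega), step_eq word (by omega), ih]

-- ===== VERDICT (by name: the statement is the Claim_ definition above) =====
theorem getDigitSum_spec : Claim_equal_getDigitSum := by
  unfold Claim_equal_getDigitSum Spec_getDigitSum
  intro word sums _
  unfold getDigitSum getDigitSum_alt
  exact go_eq _ _ _
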